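-- pv_equiv track=rewrite | github.com/jxeeno/valhalla-with-data | remove_state_road_tags.py | remove_target_network_from_lists
-- ===== SOURCE A (Python) =====
-- TARGET_NETWORKS = ['AU:QLD:S', 'AU:QLD:MR', 'AU:QLD:NR']
--
-- def parse_semicolon_list(value):
--     """Parse a semicolon-delimited list, handling empty values."""
--     if not value:
--         return []
--     return [item.strip() for item in value.split(';') if item.strip()]
--
-- def join_semicolon_list(items):
--     """Join a list into a semicolon-delimited string."""
--     return ';'.join(items)
--
-- def remove_target_network_from_lists(network_value, ref_value):
--     """
--     Remove all AU:QLD:S and AU:QLD:MR entries from network and corresponding ref entries.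
--
--     Args:
--         network_value: Network tag value (may be semicolon-delimited)
--         ref_value: Ref tag value (may be semicolon-delimited)
--
--     Returns:
--         Tuple of (new_network_value, new_ref_value, modified)
--         If all entries are removed, returns (None, None, True) to indicate tag should be deleted
--     """
--     # Parse the lists
--     network_list = parse_semicolon_list(network_value) if network_value else []
--     ref_list = parse_semicolon_list(ref_value) if ref_value else []
--
--     if not network_list:
--         return (network_value, ref_value, False)
--
--     # Find indices to remove (where network is in TARGET_NETWORKS)
--     indices_to_remove = [i for i, net in enumerate(network_list) if net in TARGET_NETWORKS]
--
--     if not indices_to_remove: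
--         return (network_value, ref_value, False)
--
--     # Remove from network list (in reverse order to maintain indices)
--     for i in reversed(indices_to_remove):
--         network_list.pop(i)
--
--     # Remove corresponding ref entries (in reverse order)
--     for i in reversed(indices_to_remove):
--         if i < len(ref_list):
--             ref_list.pop(i)
--
--     # Determine what to return
--     modified = True
--     new_network_value = None
--     new_ref_value = None
--
--     if network_list:
--         # Some network entries remain
--         new_network_value = join_semicolon_list(network_list)
--     # else: all network entries removed, return None to delete tag
--
--     if ref_list:
--         # Some ref entries remain
--         new_ref_value = join_semicolon_list(ref_list)
--     # else: all ref entries removed, return None to delete tag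
--
--     return (new_network_value, new_ref_value, modified)
-- ===== SOURCE B (Python) =====
-- TARGET_NETWORKS = ['AU:QLD:S', 'AU:QLD:MR', 'AU:QLD:NR']
--
--
-- def _parse(value):
--     """Parse a semicolon-delimited list, handling empty values."""
--     if not value:
--         return []
--     return [item.strip() for item in value.split(';') if item.strip()]
--
--
-- def remove_target_network_from_lists(network_value, ref_value):
--     """Single forward pass: rebuild both lists at once instead of
--     collecting indices and popping in reverse."""
--     network_list = _parse(network_value)
--     ref_list = _parse(ref_value)
--
--     if not any(net in TARGET_NETWORKS for net in network_list):
--         return (network_value, ref_value, False)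
--
--     new_network = []
--     new_ref = []
--     for i, net in enumerate(network_list):
--         if net not in TARGET_NETWORKS:
--             new_network.append(net)
--             if i < len(ref_list):
--                 new_ref.append(ref_list[i])
--     new_ref.extend(ref_list[len(network_list):])
--
--     return (';'.join(new_network) if new_network else None,
--             ';'.join(new_ref) if new_ref else None,
--             True)
-- ===== Notes on version B (the rewrite author's own statement) =====
-- stated objective: simpler
-- what changed: Replaced A's three-phase collect-indices / reverse-pop-network / reverse-pop-refs passes by one forward pass that rebuilds both lists simultaneously and appends the trailing refs slice.
import Mathlib
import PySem

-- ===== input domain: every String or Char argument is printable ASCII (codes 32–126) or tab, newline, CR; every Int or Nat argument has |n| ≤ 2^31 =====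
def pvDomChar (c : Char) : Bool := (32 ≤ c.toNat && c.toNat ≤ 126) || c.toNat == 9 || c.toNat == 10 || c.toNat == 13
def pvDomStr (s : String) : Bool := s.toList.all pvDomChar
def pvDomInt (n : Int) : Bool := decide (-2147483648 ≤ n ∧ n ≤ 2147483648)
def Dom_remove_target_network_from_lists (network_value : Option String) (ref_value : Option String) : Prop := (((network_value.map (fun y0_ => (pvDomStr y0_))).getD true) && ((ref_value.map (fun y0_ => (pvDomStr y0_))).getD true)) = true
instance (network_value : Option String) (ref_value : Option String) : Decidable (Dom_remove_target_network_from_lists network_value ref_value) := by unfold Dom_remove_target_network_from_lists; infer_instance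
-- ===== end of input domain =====

-- B replaces A's collect-indices / reverse-pop-network / reverse-pop-refs phases by one
-- forward pass rebuilding both lists at once (objective: simpler; return value only, no mutation observable).

-- ===== PORT A =====
def TARGET_NETWORKS : List String := ["AU:QLD:S", "AU:QLD:MR", "AU:QLD:NR"]

-- 'net in TARGET_NETWORKS'
def pIsTarget (s : String) : Bool := decide (s ∈ TARGET_NETWORKS)

-- parse_semicolon_list, fused with the callers' '… if value else []' truthiness guard
-- (None and "" both give []; parse_semicolon_list("") = [] in Python too)
def parse_semicolon_list (value : Option String) : List String :=
  match value with
  | none => []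
  | some s =>
      if s = "" then []
      else (((PySem.Str.split? s ";").getD []).filter (fun it => PySem.Str.strip it ≠ "")).map
        (fun it => PySem.Str.strip it)

-- list.pop(i), returning the remaining list (A only pops valid indices, so the none branch is unreachable)
def popStep (l : List String) (i : Int) : List String :=
  match PySem.List.pop? l i with
  | some r => r.2
  | none => l

-- the guarded ref pop: 'if i < len(ref_list): ref_list.pop(i)'
def refStep (l : List String) (i : Int) : List String :=
  if i < (l.length : Int) then popStep l i else l

def remove_target_network_from_lists (network_value : Option String) (ref_value : Option String) :
    Option String × Option String × Bool :=
  let network_list := parse_semicolon_list network_value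
  let ref_list := parse_semicolon_list ref_value
  if network_list = [] then (network_value, ref_value, false)
  else
    let indices_to_remove :=
      ((PySem.List.enumerate network_list 0).filter (fun p => pIsTarget p.2)).map (fun p => p.1)
    if indices_to_remove = [] then (network_value, ref_value, false)
    else
      let network_list2 := indices_to_remove.reverse.foldl popStep network_list
      let ref_list2 := indices_to_remove.reverse.foldl refStep ref_list
      ((if network_list2 ≠ [] then some (PySem.Str.join ";" network_list2) else none),
       (if ref_list2 ≠ [] then some (PySem.Str.join ";" ref_list2) else none),
       true)

-- ===== PORT B =====
def remove_target_network_from_lists_alt (network_value : Option String) (ref_value : Option String) :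
    Option String × Option String × Bool :=
  let network_list := parse_semicolon_list network_value
  let ref_list := parse_semicolon_list ref_value
  if (network_list.any (fun net => pIsTarget net)) = false then (network_value, ref_value, false)
  else
    let acc := (PySem.List.enumerate network_list 0).foldl
      (fun (acc : List String × List String) p =>
        if pIsTarget p.2 then acc
        else (acc.1 ++ [p.2],
          if p.1 < (ref_list.length : Int) then acc.2 ++ [PySem.List.pyGetD ref_list p.1 ""]
          else acc.2))
      ([], [])
    let new_ref := acc.2 ++ ref_list.drop network_list.length
    ((if acc.1 ≠ [] then some (PySem.Str.join ";" acc.1) else none),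
     (if new_ref ≠ [] then some (PySem.Str.join ";" new_ref) else none),
     true)

-- ===== PRECONDITION & SPEC =====
def Spec_remove_target_network_from_lists (network_value : Option String) (ref_value : Option String) (out : Option String × Option String × Bool) : Prop := out = remove_target_network_from_lists_alt network_value ref_value
instance (network_value : Option String) (ref_value : Option String) (out : Option String × Option String × Bool) : Decidable (Spec_remove_target_network_from_lists network_value ref_value out) := by unfold Spec_remove_target_network_from_lists; infer_instance

-- ===== CLAIM (what is proved, stated in full; the proofs are below) =====
def Claim_equal_remove_target_network_from_lists : Prop := ∀ (network_value : Option String) (ref_value : Option String), Dom_remove_target_network_from_lists network_value ref_value → Spec_remove_target_network_from_lists network_value ref_value (remove_target_network_from_lists network_value ref_value)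

-- ===== LEMMAS AND PROOFS =====

-- refs kept at the positions where the network entry survives (truncated at either list's end)
def keep2 (p : String → Bool) : List String → List String → List String
  | [], _ => []
  | _ :: _, [] => []
  | x :: xs, y :: ys => if p x then keep2 p xs ys else y :: keep2 p xs ys

theorem keep2_nil_right (p : String → Bool) (l : List String) : keep2 p l [] = [] := by
  cases l <;> rfl

theorem popStep_nil (i : Int) : popStep [] i = [] := by
  unfold popStep PySem.List.pop? PySem.List.pyIdx?
  split <;> simp_all

theorem popStep_zero (x : String) (xs : List String) : popStep (x :: xs) 0 = xs := by
  simp [popStep, PySem.List.pop?_zero_cons]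

theorem popStep_cons (x : String) (xs : List String) (i : Int) (hi : 1 ≤ i) :
    popStep (x :: xs) i = x :: popStep xs (i - 1) := by
  have h : PySem.List.pop? (x :: xs) i
      = (PySem.List.pop? xs (i - 1)).map (fun r => (r.1, x :: r.2)) := by
    unfold PySem.List.pop? PySem.List.pyIdx?
    simp only [List.length_cons]
    split_ifs with a b c d e f <;> try omega
    · have hk : i.toNat = (i - 1).toNat + 1 := by omega
      simp only [hk, Option.bind_some, List.getElem?_cons_succ, List.eraseIdx_cons_succ]
      cases xs[(i - 1).toNat]? <;> simp
    · simp
  unfold popStep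
  rw [h]
  cases PySem.List.pop? xs (i - 1) <;> simp

theorem refStep_nil (i : Int) : refStep [] i = [] := by
  unfold refStep
  split <;> simp [popStep_nil]

theorem refStep_zero_cons (y : String) (ys : List String) : refStep (y :: ys) 0 = ys := by
  unfold refStep
  rw [if_pos (by simp)]
  exact popStep_zero y ys

theorem refStep_cons (y : String) (ys : List String) (i : Int) (hi : 1 ≤ i) :
    refStep (y :: ys) i = y :: refStep ys (i - 1) := by
  unfold refStep
  simp only [List.length_cons]
  split_ifs with a b <;> try omega
  · exact popStep_cons y ys i hi
  · rfl

theorem foldl_popStep_shift (J : List Int) (h : ∀ j ∈ J, 1 ≤ j) (x : String) (xs : List String) :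
    J.foldl popStep (x :: xs) = x :: (J.map (· - 1)).foldl popStep xs := by
  induction J generalizing xs with
  | nil => rfl
  | cons j J ih =>
      simp only [List.foldl_cons, List.map_cons]
      rw [popStep_cons x xs j (h j (by simp))]
      exact ih (fun j hj => h j (by simp [hj])) _

theorem foldl_refStep_shift (J : List Int) (h : ∀ j ∈ J, 1 ≤ j) (y : String) (ys : List String) :
    J.foldl refStep (y :: ys) = y :: (J.map (· - 1)).foldl refStep ys := by
  induction J generalizing ys with
  | nil => rfl
  | cons j J ih =>
      simp only [List.foldl_cons, List.map_cons]
      rw [refStep_cons y ys j (h j (by simp))]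
      exact ih (fun j hj => h j (by simp [hj])) _

theorem foldl_refStep_nil (J : List Int) : J.foldl refStep [] = [] := by
  induction J with
  | nil => rfl
  | cons j J ih => simp [refStep_nil, ih]

def idcs (p : String → Bool) (l : List String) : List Int :=
  ((PySem.List.enumerate l 0).filter (fun q => p q.2)).map (fun q => q.1)

theorem enumerate_shift {α : Type} (xs : List α) (s : Int) :
    PySem.List.enumerate xs (s + 1) = (PySem.List.enumerate xs s).map (fun q => (q.1 + 1, q.2)) := by
  induction xs generalizing s with
  | nil => simp [PySem.List.enumerate_nil]
  | cons x xs ih => simp [PySem.List.enumerate_cons, ih]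

theorem idcs_cons (p : String → Bool) (x : String) (xs : List String) :
    idcs p (x :: xs) = (if p x then [(0 : Int)] else []) ++ (idcs p xs).map (· + 1) := by
  unfold idcs
  rw [PySem.List.enumerate_cons, show (0 : Int) + 1 = 0 + 1 by rfl, enumerate_shift]
  by_cases hp : p x
  · simp [hp, List.filter_map, Function.comp_def]
  · simp [hp, List.filter_map, Function.comp_def]

theorem mem_idcs_nonneg (p : String → Bool) (l : List String) (j : Int) (hj : j ∈ idcs p l) :
    0 ≤ j := by
  unfold idcs at hj
  simp only [List.mem_map, List.mem_filter] at hj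
  obtain ⟨q, ⟨hq, _⟩, rfl⟩ := hj
  rw [PySem.List.mem_enumerate_iff] at hq
  obtain ⟨k, hk, rfl⟩ := hq
  simp

theorem pvMapAddSub (J : List Int) : (J.map (· + 1)).map (· - 1) = J := by
  rw [List.map_map]
  simp [Function.comp_def]

theorem popFold (p : String → Bool) (l : List String) :
    (idcs p l).reverse.foldl popStep l = l.filter (fun s => !(p s)) := by
  induction l with
  | nil => simp [idcs]
  | cons x xs ih =>
      rw [idcs_cons, List.reverse_append, List.foldl_append, ← List.map_reverse,
        foldl_popStep_shift _ (by
          intro j hj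
          simp only [List.mem_map, List.mem_reverse] at hj
          obtain ⟨j', hj', rfl⟩ := hj
          have := mem_idcs_nonneg p xs j' hj'
          omega)]
      rw [pvMapAddSub, ih]
      by_cases hp : p x
      · simp [hp, popStep_zero]
      · simp [hp]

theorem refFold (p : String → Bool) (l : List String) :
    ∀ r : List String,
      (idcs p l).reverse.foldl refStep r = keep2 p l r ++ r.drop l.length := by
  induction l with
  | nil => intro r; simp [idcs, keep2]
  | cons x xs ih =>
      intro r
      rw [idcs_cons, List.reverse_append, List.foldl_append]
      cases r with
      | nil =>
          rw [foldl_refStep_nil, keep2_nil_right]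
          by_cases hp : p x <;> simp [hp, refStep_nil]
      | cons y ys =>
          rw [← List.map_reverse, foldl_refStep_shift _ (by
            intro j hj
            simp only [List.mem_map, List.mem_reverse] at hj
            obtain ⟨j', hj', rfl⟩ := hj
            have := mem_idcs_nonneg p xs j' hj'
            omega)]
          rw [pvMapAddSub, ih ys]
          by_cases hp : p x
          · simp [hp, keep2, refStep_zero_cons]
          · simp [hp, keep2]

theorem pvDropSuccNil (R : List String) (s : Nat) (h : R.drop s = []) : R.drop (s + 1) = [] :=
  List.drop_eq_nil_iff.mpr (by have := List.drop_eq_nil_iff.mp h; omega)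

theorem pvDropSuccCons (R : List String) (s : Nat) (y : String) (ys : List String)
    (h : R.drop s = y :: ys) : R.drop (s + 1) = ys := by
  rw [← List.drop_drop, h]; rfl

theorem keep2_dropT (p : String → Bool) (x : String) (xs R : List String) (s : Nat)
    (hp : p x = true) : keep2 p (x :: xs) (R.drop s) = keep2 p xs (R.drop (s + 1)) := by
  rcases hdrop : R.drop s with _ | ⟨y, ys⟩
  · rw [keep2_nil_right, pvDropSuccNil R s hdrop, keep2_nil_right]
  · rw [pvDropSuccCons R s y ys hdrop, keep2, if_pos hp]

theorem keep2_dropF (p : String → Bool) (x : String) (xs R : List String) (s : Nat)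
    (hp : p x = false) :
    keep2 p (x :: xs) (R.drop s)
      = (if (s : Int) < (R.length : Int) then [PySem.List.pyGetD R (s : Int) ""] else [])
        ++ keep2 p xs (R.drop (s + 1)) := by
  rcases hdrop : R.drop s with _ | ⟨y, ys⟩
  · have hlen : R.length ≤ s := List.drop_eq_nil_iff.mp hdrop
    rw [keep2_nil_right, pvDropSuccNil R s hdrop, keep2_nil_right,
      if_neg (by exact_mod_cast Nat.not_lt.mpr hlen)]
    rfl
  · have hlt : s < R.length := by
      by_contra hh
      rw [List.drop_eq_nil_iff.mpr (by omega)] at hdrop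
      exact absurd hdrop (by simp)
    have hy : PySem.List.pyGetD R (s : Int) "" = y := by
      rw [PySem.List.pyGetD_natCast]
      have h0 : (R.drop s)[0]? = some y := by rw [hdrop]; rfl
      rw [List.getElem?_drop, Nat.add_zero] at h0
      simp [List.getD, h0]
    rw [pvDropSuccCons R s y ys hdrop, keep2, if_neg (by simp [hp]), hy,
      if_pos (by exact_mod_cast hlt)]
    rfl

theorem bFold (p : String → Bool) (R : List String) (n : List String) :
    ∀ (s : Nat) (a : List String × List String),
      (PySem.List.enumerate n (s : Int)).foldl
        (fun (acc : List String × List String) q =>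
          if p q.2 then acc
          else (acc.1 ++ [q.2],
            if q.1 < (R.length : Int) then acc.2 ++ [PySem.List.pyGetD R q.1 ""] else acc.2))
        a
      = (a.1 ++ n.filter (fun t => !(p t)), a.2 ++ keep2 p n (R.drop s)) := by
  induction n with
  | nil => intro s a; simp [PySem.List.enumerate_nil, keep2]
  | cons x xs ih =>
      intro s a
      rw [PySem.List.enumerate_cons, List.foldl_cons]
      have hs1 : (s : Int) + 1 = ((s + 1 : Nat) : Int) := by push_cast; ring
      by_cases hp : p x
      · simp only [hp, if_true]
        rw [hs1, ih (s + 1) a, keep2_dropT p x xs R s hp]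
        simp [hp]
      · simp only [hp, Bool.false_eq_true, if_false]
        rw [hs1, ih (s + 1) _, keep2_dropF p x xs R s (eq_false_of_ne_true hp)]
        rw [Prod.mk.injEq]
        constructor <;> dsimp only
        · simp [hp]
        · split_ifs <;> simp

theorem any_iff_idcs_ne (p : String → Bool) (l : List String) :
    l.any p = false ↔ idcs p l = [] := by
  unfold idcs
  rw [List.map_eq_nil_iff, List.filter_eq_nil_iff]
  constructor
  · intro h q hq
    rw [PySem.List.mem_enumerate_iff] at hq
    obtain ⟨k, hk, rfl⟩ := hq
    have := List.any_eq_false.mp h l[k] (by simp)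
    simp [this]
  · intro h
    rw [List.any_eq_false]
    intro x hx
    obtain ⟨k, hk, hxk⟩ := List.mem_iff_getElem.mp hx
    have := h (0 + (k : Int), l[k]) (by rw [PySem.List.mem_enumerate_iff]; exact ⟨k, hk, rfl⟩)
    simp only at this
    rw [← hxk]
    simpa using this

-- ===== VERDICT (by name: the statement is the Claim_ definition above) =====
theorem remove_target_network_from_lists_spec : Claim_equal_remove_target_network_from_lists := by
  intro nv rv _
  unfold Spec_remove_target_network_from_lists
  unfold remove_target_network_from_lists remove_target_network_from_lists_alt
  set n := parse_semicolon_list nv with hn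
  set r := parse_semicolon_list rv with hr
  by_cases hany : n.any (fun net => pIsTarget net) = false
  · -- no target present (or empty list): both sides return the raw inputs unmodified
    rw [if_pos hany]
    by_cases hnil : n = []
    · rw [if_pos hnil]
    · rw [if_neg hnil]
      have : ((PySem.List.enumerate n 0).filter (fun p => pIsTarget p.2)).map (fun p => p.1) = [] :=
        (any_iff_idcs_ne _ n).mp hany
      rw [if_pos this]
  · rw [if_neg hany]
    have hnil : n ≠ [] := by
      intro h; rw [h] at hany; simp at hany
    rw [if_neg hnil]
    have hne : ((PySem.List.enumerate n 0).filter (fun p => pIsTarget p.2)).map (fun p => p.1) ≠ [] := by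
      intro h
      exact hany ((any_iff_idcs_ne _ n).mpr h)
    rw [if_neg hne]
    have hA1 := popFold (fun s => pIsTarget s) n
    have hA2 := refFold (fun s => pIsTarget s) n r
    have hB := bFold (fun s => pIsTarget s) r n 0 ([], [])
    unfold idcs at hA1 hA2
    rw [hA1, hA2]
    rw [show ((0 : Nat) : Int) = (0 : Int) by rfl] at hB
    rw [hB]
    simp only [List.nil_append, List.drop_zero]
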